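-- pv_equiv track=rewrite | github.com/AppsByCole/Variant-CLI-Generator | main.py | new_file_content
-- ===== SOURCE A (Python) =====
-- def new_video_system_lines(line, video_system, file_name):
--     if video_system == "Avatar":
--         if line.startswith("set osd_displayport_device = "):
--             return "set osd_displayport_device = MSP"
--         elif line.startswith("set displayport_msp_serial = "):
--             if file_name.startswith("Cinewhoop" or "Skylite" or "Moongoat"):
--                 return "set displayport_msp_serial = 2"
--             return "set displayport_msp_serial = 1"
--     elif video_system == "DJI O3":
--         if line.startswith("set osd_displayport_device = "):
--             return "set osd_displayport_device = MSP"
--         elif line.startswith("set displayport_msp_serial = "):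
--             return "set displayport_msp_serial = 1"
--         pass
--     elif video_system == "DJI":
--         if line.startswith("set osd_displayport_device = "):
--             return "set osd_displayport_device = AUTO"
--     elif video_system == "Analog":
--         if line.startswith("set osd_displayport_device = "):
--             return "set osd_displayport_device = AUTO"
--     return line
--
-- def new_receiver_lines(line, receiver):
--     if receiver == "FrSky":
--         if line.startswith("set serialrx_provider = "):
--             return "set serialrx_provider = SBUS"
--         elif line.startswith("map "):
--             return "map AETR1234"
--     elif receiver == "Crossfire":
--         if line.startswith("set serialrx_provider = "):
--             return "set serialrx_provider = CRSF"
--         elif line.startswith("map "):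
--             return "map TAER1234"
--     elif receiver == "Ghost":
--         if line.startswith("set serialrx_provider = "):
--             return "set serialrx_provider = GHST"
--         elif line.startswith("map "):
--             return "map AETR1234"
--     elif receiver == "ELRS":
--         if line.startswith("set serialrx_provider = "):
--             return "set serialrx_provider = CRSF"
--         elif line.startswith("map "):
--             return "map TAER1234"
--     elif receiver == "DJI":
--         if line.startswith("set serialrx_provider = "):
--             return "set serialrx_provider = SBUS"
--         elif line.startswith("map "):
--             return "map AETR1234"
--     return line
--
-- def new_name_line(line, video_system, receiver, file_name):
--     if line.startswith("set name = "):
--         prefix = file_name.split(" ")[0]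
--         return f"set name = {prefix} {video_system} {receiver}"
--     return line
--
-- def new_aux_lines(line, video_system, receiver):
--     if video_system == "DJI O3" and receiver == "DJI":
--         if line.startswith("aux 0"):
--             return "aux 0 0 3 1700 2100 0 0"
--         elif line.startswith("aux 1"):
--             return "aux 1 1 0 900 1650 0 0"
--         elif line.startswith("aux 2"):
--             return "aux 2 13 2 1700 2100 0 0"
--         elif line.startswith("aux 3"):
--             return "aux 3 35 1 1700 2100 0 0"
--     if line.startswith("aux 0"):
--         return "aux 0 0 0 1700 2100 0 0"
--     elif line.startswith("aux 1"):
--         return "aux 1 1 1 1700 2100 0 0"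
--     elif line.startswith("aux 2"):
--         return "aux 2 13 3 1700 2100 0 0"
--     elif line.startswith("aux 3"):
--         return "aux 3 35 2 1700 2100 0 0"
--     return line
--
-- def new_file_content(file_contents, video_system, receiver, file_name):
--     lines = file_contents.split("\n")
--     modified_lines = []
--     for line in lines:
--         modified_line = new_video_system_lines(line, video_system, file_name)
--         modified_line = new_receiver_lines(modified_line, receiver)
--         modified_line = new_aux_lines(line, video_system, receiver)
--         modified_line = new_name_line(
--             modified_line, video_system, receiver, file_name)
--         modified_lines.append(modified_line)
--     return "\n".join(modified_lines)
-- ===== SOURCE B (Python) =====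
-- def new_file_content(file_contents, video_system, receiver, file_name):
--     # Staged rewriting: a data-driven table of (prefix, replacement) rules, each rule
--     # applied in its own full pass over the lines.  Correct because the five prefixes
--     # are mutually exclusive and no replacement string matches a later rule's prefix.
--     # The original's video-system/receiver transforms are dead code (their results are
--     # overwritten by the aux step, which reads the original line), so no rules for them.
--     special = video_system == "DJI O3" and receiver == "DJI"
--     rules = [
--         ("aux 0", "aux 0 0 3 1700 2100 0 0" if special else "aux 0 0 0 1700 2100 0 0"),
--         ("aux 1", "aux 1 1 0 900 1650 0 0" if special else "aux 1 1 1 1700 2100 0 0"),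
--         ("aux 2", "aux 2 13 2 1700 2100 0 0" if special else "aux 2 13 3 1700 2100 0 0"),
--         ("aux 3", "aux 3 35 1 1700 2100 0 0" if special else "aux 3 35 2 1700 2100 0 0"),
--         ("set name = ", f'set name = {file_name.split(" ")[0]} {video_system} {receiver}'),
--     ]
--     lines = file_contents.split("\n")
--     for prefix, repl in rules:
--         lines = [repl if l.startswith(prefix) else l for l in lines]
--     return "\n".join(lines)
-- ===== Notes on version B (the rewrite author's own statement) =====
-- stated objective: simpler
-- what changed: Replaces the four-helper per-line pipeline with data-driven staged rewriting: a table of five (prefix, replacement) rules, each applied in its own full pass over the lines (the prefixes are mutually exclusive and no replacement matches a later prefix, so staged passes equal A's dispatch); A's video-system/receiver transforms are dropped as dead code since the aux step reads the original line and overwrites them.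
import Mathlib
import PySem

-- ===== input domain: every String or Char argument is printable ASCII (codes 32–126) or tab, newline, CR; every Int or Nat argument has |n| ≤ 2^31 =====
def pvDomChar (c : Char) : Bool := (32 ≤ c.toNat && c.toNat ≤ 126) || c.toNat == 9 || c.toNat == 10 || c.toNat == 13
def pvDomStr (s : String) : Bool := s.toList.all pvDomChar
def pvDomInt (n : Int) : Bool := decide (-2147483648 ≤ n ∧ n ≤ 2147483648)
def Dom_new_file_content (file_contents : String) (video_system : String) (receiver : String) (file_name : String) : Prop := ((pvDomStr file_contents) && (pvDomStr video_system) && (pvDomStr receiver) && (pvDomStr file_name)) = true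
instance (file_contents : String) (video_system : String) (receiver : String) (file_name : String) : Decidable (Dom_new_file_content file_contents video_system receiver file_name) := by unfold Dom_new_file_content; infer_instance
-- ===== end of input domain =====

-- B replaces A's four-helper per-line pipeline by staged rewriting from a rules table
-- (one full pass per rule); A's video/receiver transforms are dead code (the aux step
-- reads the original line and overwrites them). Objective: simpler.

-- ===== PORT A =====
def new_video_system_lines (line : String) (video_system : String) (file_name : String) : String :=
  if video_system == "Avatar" then
    if PySem.Str.startswith line "set osd_displayport_device = " then
      "set osd_displayport_device = MSP"
    else if PySem.Str.startswith line "set displayport_msp_serial = " then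
      -- Python: ("Cinewhoop" or "Skylite" or "Moongoat") evaluates to "Cinewhoop"
      if PySem.Str.startswith file_name "Cinewhoop" then "set displayport_msp_serial = 2"
      else "set displayport_msp_serial = 1"
    else line
  else if video_system == "DJI O3" then
    if PySem.Str.startswith line "set osd_displayport_device = " then
      "set osd_displayport_device = MSP"
    else if PySem.Str.startswith line "set displayport_msp_serial = " then
      "set displayport_msp_serial = 1"
    else line
  else if video_system == "DJI" then
    if PySem.Str.startswith line "set osd_displayport_device = " then
      "set osd_displayport_device = AUTO"
    else line
  else if video_system == "Analog" then
    if PySem.Str.startswith line "set osd_displayport_device = " then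
      "set osd_displayport_device = AUTO"
    else line
  else line

def new_receiver_lines (line : String) (receiver : String) : String :=
  if receiver == "FrSky" then
    if PySem.Str.startswith line "set serialrx_provider = " then "set serialrx_provider = SBUS"
    else if PySem.Str.startswith line "map " then "map AETR1234"
    else line
  else if receiver == "Crossfire" then
    if PySem.Str.startswith line "set serialrx_provider = " then "set serialrx_provider = CRSF"
    else if PySem.Str.startswith line "map " then "map TAER1234"
    else line
  else if receiver == "Ghost" then
    if PySem.Str.startswith line "set serialrx_provider = " then "set serialrx_provider = GHST"
    else if PySem.Str.startswith line "map " then "map AETR1234"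
    else line
  else if receiver == "ELRS" then
    if PySem.Str.startswith line "set serialrx_provider = " then "set serialrx_provider = CRSF"
    else if PySem.Str.startswith line "map " then "map TAER1234"
    else line
  else if receiver == "DJI" then
    if PySem.Str.startswith line "set serialrx_provider = " then "set serialrx_provider = SBUS"
    else if PySem.Str.startswith line "map " then "map AETR1234"
    else line
  else line

def new_name_line (line : String) (video_system : String) (receiver : String) (file_name : String) : String :=
  if PySem.Str.startswith line "set name = " then
    let prefixW := (((PySem.Str.split? file_name " ").getD [])).headD ""   -- file_name.split(" ")[0]; split(" ") is never empty
    "set name = " ++ prefixW ++ " " ++ video_system ++ " " ++ receiver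
  else line

-- the fall-through part of new_aux_lines (Python reaches it from both the special and the plain path)
def new_aux_lines_common (line : String) : String :=
  if PySem.Str.startswith line "aux 0" then "aux 0 0 0 1700 2100 0 0"
  else if PySem.Str.startswith line "aux 1" then "aux 1 1 1 1700 2100 0 0"
  else if PySem.Str.startswith line "aux 2" then "aux 2 13 3 1700 2100 0 0"
  else if PySem.Str.startswith line "aux 3" then "aux 3 35 2 1700 2100 0 0"
  else line

def new_aux_lines (line : String) (video_system : String) (receiver : String) : String :=
  if video_system == "DJI O3" && receiver == "DJI" then
    if PySem.Str.startswith line "aux 0" then "aux 0 0 3 1700 2100 0 0"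
    else if PySem.Str.startswith line "aux 1" then "aux 1 1 0 900 1650 0 0"
    else if PySem.Str.startswith line "aux 2" then "aux 2 13 2 1700 2100 0 0"
    else if PySem.Str.startswith line "aux 3" then "aux 3 35 1 1700 2100 0 0"
    else new_aux_lines_common line
  else new_aux_lines_common line

def new_file_content (file_contents : String) (video_system : String) (receiver : String) (file_name : String) : String :=
  let lines := ((PySem.Str.split? file_contents "\n").getD [])
  let modified_lines := lines.map (fun line =>
    let _m1 := new_video_system_lines line video_system file_name
    let _m2 := new_receiver_lines _m1 receiver
    let m3 := new_aux_lines line video_system receiver          -- overwrites _m2, as in the Python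
    new_name_line m3 video_system receiver file_name)
  PySem.Str.join "\n" modified_lines

-- ===== PORT B =====
def new_file_content_alt (file_contents : String) (video_system : String) (receiver : String) (file_name : String) : String :=
  let special := video_system == "DJI O3" && receiver == "DJI"
  let rules : List (String × String) := [
    ("aux 0", if special then "aux 0 0 3 1700 2100 0 0" else "aux 0 0 0 1700 2100 0 0"),
    ("aux 1", if special then "aux 1 1 0 900 1650 0 0" else "aux 1 1 1 1700 2100 0 0"),
    ("aux 2", if special then "aux 2 13 2 1700 2100 0 0" else "aux 2 13 3 1700 2100 0 0"),
    ("aux 3", if special then "aux 3 35 1 1700 2100 0 0" else "aux 3 35 2 1700 2100 0 0"),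
    ("set name = ", "set name = " ++ (((PySem.Str.split? file_name " ").getD [])).headD "" ++ " " ++ video_system ++ " " ++ receiver)]
  let lines := rules.foldl (fun ls r =>
    ls.map (fun l => if PySem.Str.startswith l r.1 then r.2 else l))
    ((PySem.Str.split? file_contents "\n").getD [])
  PySem.Str.join "\n" lines

-- ===== PRECONDITION & SPEC =====
def Spec_new_file_content (file_contents : String) (video_system : String) (receiver : String) (file_name : String) (out : String) : Prop := out = new_file_content_alt file_contents video_system receiver file_name
instance (file_contents : String) (video_system : String) (receiver : String) (file_name : String) (out : String) : Decidable (Spec_new_file_content file_contents video_system receiver file_name out) := by unfold Spec_new_file_content; infer_instance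

-- ===== CLAIM (what is proved, stated in full; the proofs are below) =====
def Claim_equal_new_file_content : Prop := ∀ (file_contents : String) (video_system : String) (receiver : String) (file_name : String), Dom_new_file_content file_contents video_system receiver file_name → Spec_new_file_content file_contents video_system receiver file_name (new_file_content file_contents video_system receiver file_name)

-- ===== LEMMAS AND PROOFS =====
-- folding rule-wise passes over the list = one pass applying the rules in order to each element
theorem foldl_map_swap {α β : Type} (g : β → α → α) :
    ∀ (rules : List β) (xs : List α),
    rules.foldl (fun ls r => ls.map (g r)) xs = xs.map (fun x => rules.foldl (fun a r => g r a) x) := by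
  intro rules
  induction rules with
  | nil => intro xs; simp
  | cons r rs ih => intro xs; simp [List.foldl, ih, List.map_map, Function.comp]

-- per-line: applying the five rules in order equals A's per-line pipeline
theorem line_eq (line video_system receiver file_name : String) :
    ([("aux 0", if (video_system == "DJI O3" && receiver == "DJI") then "aux 0 0 3 1700 2100 0 0" else "aux 0 0 0 1700 2100 0 0"),
      ("aux 1", if (video_system == "DJI O3" && receiver == "DJI") then "aux 1 1 0 900 1650 0 0" else "aux 1 1 1 1700 2100 0 0"),
      ("aux 2", if (video_system == "DJI O3" && receiver == "DJI") then "aux 2 13 2 1700 2100 0 0" else "aux 2 13 3 1700 2100 0 0"),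
      ("aux 3", if (video_system == "DJI O3" && receiver == "DJI") then "aux 3 35 1 1700 2100 0 0" else "aux 3 35 2 1700 2100 0 0"),
      ("set name = ", "set name = " ++ (((PySem.Str.split? file_name " ").getD [])).headD "" ++ " " ++ video_system ++ " " ++ receiver)] :
        List (String × String)).foldl
      (fun a r => if PySem.Str.startswith a r.1 then r.2 else a) line =
    new_name_line (new_aux_lines line video_system receiver) video_system receiver file_name := by
  simp only [List.foldl]
  unfold new_aux_lines new_aux_lines_common new_name_line
  by_cases hs : (video_system == "DJI O3" && receiver == "DJI") = true <;>
  by_cases h0 : PySem.Str.startswith line "aux 0" = true <;>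
  by_cases h1 : PySem.Str.startswith line "aux 1" = true <;>
  by_cases h2 : PySem.Str.startswith line "aux 2" = true <;>
  by_cases h3 : PySem.Str.startswith line "aux 3" = true <;>
  by_cases h4 : PySem.Str.startswith line "set name = " = true <;>
  simp only [hs, h0, h1, h2, h3, h4, if_true, if_false, Bool.false_eq_true] <;>
  rfl

-- ===== VERDICT (by name: the statement is the Claim_ definition above) =====
theorem new_file_content_spec : Claim_equal_new_file_content := by
  intro file_contents video_system receiver file_name _
  unfold Spec_new_file_content new_file_content new_file_content_alt
  simp only []
  rw [foldl_map_swap]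
  refine congrArg (PySem.Str.join "\n") (List.map_congr_left ?_)
  intro line _
  exact (line_eq line video_system receiver file_name).symm
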